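-- pv_equiv track=rewrite | github.com/kazuya-111/kazuya-111 | list-and-social-network/nakky007mymail.unisa.edu.au_list_function.py | remove_value
-- ===== SOURCE A (Python) =====
-- def length(my_list):
--     #number of count= measure
--     measure = 0
--
--     # count the list of elements by using for loop.
--     for item in my_list:
--         measure = measure + 1
--
--     #if not return disiplay none
--     return measure
--
-- def remove_value(my_list, remove_position):
--     #empty list
--     new_list = []
--
--     #be adjust to the begin
--     if remove_position < 0:
--         remove_position = 0
--
--     #be adjust to the end
--     elif remove_position > length(my_list):
--         remove_position = length(my_list) - 1
--
--     for index in range(length(my_list)):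
--         if index != remove_position:
--             new_list.append(my_list[index])
--
--     return new_list
-- ===== SOURCE B (Python) =====
-- def remove_value(my_list, remove_position):
--     # same clamping as the original
--     if remove_position < 0:
--         remove_position = 0
--     elif remove_position > len(my_list):
--         remove_position = len(my_list) - 1
--     # slice concatenation instead of an index loop with a skip branch
--     return my_list[:remove_position] + my_list[remove_position + 1:]
-- ===== Notes on version B (the rewrite author's own statement) =====
-- stated objective: simpler
-- what changed: Replaces the hand-rolled length() helper and the index loop with an append-if-not-equal branch by len() plus the concatenation of two slices my_list[:p] + my_list[p+1:], keeping the original clamping.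
import Mathlib
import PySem

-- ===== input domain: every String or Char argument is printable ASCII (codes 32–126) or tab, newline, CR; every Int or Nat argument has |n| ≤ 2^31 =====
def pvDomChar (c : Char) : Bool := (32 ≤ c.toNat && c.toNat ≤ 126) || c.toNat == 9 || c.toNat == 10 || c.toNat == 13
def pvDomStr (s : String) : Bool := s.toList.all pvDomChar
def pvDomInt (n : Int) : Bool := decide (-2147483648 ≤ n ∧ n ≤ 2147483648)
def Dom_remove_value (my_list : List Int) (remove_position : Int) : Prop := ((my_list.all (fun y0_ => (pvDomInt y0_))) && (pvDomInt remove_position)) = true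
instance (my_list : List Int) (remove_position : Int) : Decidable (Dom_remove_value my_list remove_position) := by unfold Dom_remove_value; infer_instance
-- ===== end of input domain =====

-- B replaces A's counting helper and index loop with len() and two-slice concatenation (objective: simpler).

-- ===== PORT A =====
-- helper 'length': counts elements with a loop
def pyLength (my_list : List Int) : Int := my_list.foldl (fun measure _ => measure + 1) 0

def remove_value (my_list : List Int) (remove_position : Int) : List Int :=
  let rp : Int :=
    if remove_position < 0 then 0
    else if remove_position > pyLength my_list then pyLength my_list - 1
    else remove_position
  (PySem.List.pyRange 0 (pyLength my_list) 1).foldl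
    (fun new_list index =>
      if index ≠ rp then new_list ++ [PySem.List.pyGetD my_list index 0] else new_list) []
  -- my_list[index] is always in range here, so pyGetD with any default is exact

-- ===== PORT B =====
def remove_value_alt (my_list : List Int) (remove_position : Int) : List Int :=
  let rp : Int :=
    if remove_position < 0 then 0
    else if remove_position > (my_list.length : Int) then (my_list.length : Int) - 1
    else remove_position
  PySem.List.slice my_list none (some rp) ++ PySem.List.slice my_list (some (rp + 1)) none

-- ===== PRECONDITION & SPEC =====
def Spec_remove_value (my_list : List Int) (remove_position : Int) (out : List Int) : Prop := out = remove_value_alt my_list remove_position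
instance (my_list : List Int) (remove_position : Int) (out : List Int) : Decidable (Spec_remove_value my_list remove_position out) := by unfold Spec_remove_value; infer_instance

-- ===== CLAIM (what is proved, stated in full; the proofs are below) =====
def Claim_equal_remove_value : Prop := ∀ (my_list : List Int) (remove_position : Int), Dom_remove_value my_list remove_position → Spec_remove_value my_list remove_position (remove_value my_list remove_position)

-- ===== LEMMAS AND PROOFS =====

theorem pyLength_eq (xs : List Int) : pyLength xs = (xs.length : Int) := by
  unfold pyLength
  rw [PySem.List.foldl_add (g := fun _ => (1 : Int))]
  simp

-- getD over all indices rebuilds the list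
theorem map_getD_range (xs : List Int) :
    (List.range xs.length).map (fun k => xs.getD k 0) = xs := by
  apply List.ext_getElem
  · simp
  · intro i h1 h2
    simp [List.getElem?_eq_getElem h2]

-- the skip-one loop on the Nat side equals take ++ drop
theorem filter_map_getD (xs : List Int) (t : Nat) :
    ((List.range xs.length).filter (fun k => k ≠ t)).map (fun k => xs.getD k 0)
      = xs.take t ++ xs.drop (t + 1) := by
  induction xs generalizing t with
  | nil => simp
  | cons x xs ih =>
    rw [List.length_cons, List.range_succ_eq_map]
    cases t with
    | zero =>
      simp only [List.filter_cons]
      have h1 : ((List.range xs.length).map Nat.succ).filter (fun k => k ≠ 0)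
          = (List.range xs.length).map Nat.succ := by
        apply List.filter_eq_self.mpr; intro a ha; simp at ha ⊢; omega
      simp only [decide_eq_true_eq]
      rw [if_neg (by simp), h1, List.map_map]
      have : ((fun k => (x :: xs).getD k 0) ∘ Nat.succ) = fun k => xs.getD k 0 := by
        funext k; simp
      rw [this, map_getD_range]; simp
    | succ s =>
      simp only [List.filter_cons, decide_eq_true_eq]
      rw [if_pos (by omega), List.filter_map, List.map_cons, List.map_map]
      have hf : ((fun k => (x :: xs).getD k 0) ∘ Nat.succ) = fun k => xs.getD k 0 := by
        funext k; simp
      have hp : ((fun k => decide (k ≠ s + 1)) ∘ Nat.succ) = fun k => decide (k ≠ s) := by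
        funext k; simp
      rw [hf, hp, ih s]; simp

-- the loop of A equals B's two slices, for a nonnegative clamped position
theorem loop_eq_slices (xs : List Int) (r : Int) (hr : 0 ≤ r) :
    (PySem.List.pyRange 0 (xs.length : Int) 1).foldl
      (fun new_list index =>
        if index ≠ r then new_list ++ [PySem.List.pyGetD xs index 0] else new_list) []
      = PySem.List.slice xs none (some r) ++ PySem.List.slice xs (some (r + 1)) none := by
  rw [PySem.List.slice_to (xs := xs) hr, PySem.List.slice_from (xs := xs) (a := r + 1) (by omega)]
  have htn : (r + 1).toNat = r.toNat + 1 := by omega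
  rw [htn]
  rw [PySem.List.foldl_append_ite (p := fun i => i ≠ r) (f := fun i => PySem.List.pyGetD xs i 0)]
  rw [PySem.List.pyRange_one]
  have hlen : ((xs.length : Int) - 0).toNat = xs.length := by omega
  rw [hlen, List.filter_map, List.map_map]
  have hf : ((fun i => PySem.List.pyGetD xs i 0) ∘ fun k : Nat => (0 : Int) + k)
      = fun k : Nat => xs.getD k 0 := by
    funext k; simp [PySem.List.pyGetD_natCast]
  have hp : ((fun i => decide (i ≠ r)) ∘ fun k : Nat => (0 : Int) + k)
      = fun k : Nat => decide (k ≠ r.toNat) := by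
    funext k; simp; omega
  rw [hf, hp, filter_map_getD]
  simp

-- ===== VERDICT (by name: the statement is the Claim_ definition above) =====
theorem remove_value_spec : Claim_equal_remove_value := by
  intro xs rp _
  unfold Spec_remove_value remove_value remove_value_alt
  rw [pyLength_eq]
  by_cases h0 : rp < 0
  · simp only [if_pos h0]
    exact loop_eq_slices xs 0 le_rfl
  · by_cases h1 : rp > (xs.length : Int)
    · simp only [if_neg h0, if_pos h1]
      cases xs with
      | nil => simp [PySem.List.slice]
      | cons x t =>
        exact loop_eq_slices (x :: t) (((x :: t).length : Int) - 1) (by simp)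
    · simp only [if_neg h0, if_neg h1]
      exact loop_eq_slices xs rp (by omega)
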